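-- pv_equiv track=rewrite | github.com/itcosplay/quiz_bot | answers_handlers.py | get_explanation
-- ===== SOURCE A (Python) =====
-- def get_explanation(right_answer):
--     index = 0
--     for char in right_answer:
--         if char == '.':
--             index += 1
--             break
--         if char == ',':
--             break
--         if char == '(':
--             index -= 1
--             break
--
--         index += 1
--
--     explanation = right_answer[index:].strip()
--
--     if len(explanation) > 2:
--
--         return right_answer[index:]
--
--     return ''
-- ===== SOURCE B (Python) =====
-- def get_explanation(right_answer):
--     d = right_answer.find('.')
--     c = right_answer.find(',')
--     p = right_answer.find('(')
--     candidates = [x for x in (d, c, p) if x != -1]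
--     if not candidates:
--         index = len(right_answer)
--     else:
--         m = min(candidates)
--         index = m + 1 if m == d else (m - 1 if m == p else m)
--     tail = right_answer[index:]
--     return tail if len(tail.strip()) > 2 else ''
-- ===== Notes on version B (the rewrite author's own statement) =====
-- stated objective: idiomatic
-- what changed: Replaced A's manual character-counting loop with three early exits by three str.find position lookups, a min-selection of the earliest delimiter and an arithmetic offset for the '.'/'(' cases, then one slice-and-strip check.
import Mathlib
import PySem

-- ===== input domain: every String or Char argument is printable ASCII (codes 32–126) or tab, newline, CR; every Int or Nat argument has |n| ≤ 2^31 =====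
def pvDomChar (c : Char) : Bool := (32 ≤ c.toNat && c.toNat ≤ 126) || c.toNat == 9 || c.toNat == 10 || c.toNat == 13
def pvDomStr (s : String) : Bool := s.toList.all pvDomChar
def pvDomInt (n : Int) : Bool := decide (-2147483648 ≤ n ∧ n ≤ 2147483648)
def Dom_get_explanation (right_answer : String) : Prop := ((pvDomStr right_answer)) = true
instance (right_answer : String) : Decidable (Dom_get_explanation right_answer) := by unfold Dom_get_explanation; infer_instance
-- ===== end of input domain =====

-- B replaces A's manual counting loop with early exits by three str.find position
-- lookups and a min-selection (objective: idiomatic); return values proved equal on all inputs.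

-- ===== PORT A =====
-- A's for-loop with early break: index counts chars scanned; '.' adds 1 and breaks,
-- ',' breaks as is, '(' subtracts 1 and breaks.
def getExpIndexA : List Char → Int
  | [] => 0
  | c :: rest =>
    if c = '.' then 1
    else if c = ',' then 0
    else if c = '(' then -1
    else 1 + getExpIndexA rest

def get_explanation (right_answer : String) : String :=
  let index : Int := getExpIndexA right_answer.toList
  let explanation := PySem.Str.strip (PySem.Str.slice right_answer (some index) none)
  if (PySem.Str.len explanation : Int) > 2 then PySem.Str.slice right_answer (some index) none
  else ""

-- ===== PORT B =====
def get_explanation_alt (right_answer : String) : String :=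
  let d := PySem.Str.find right_answer "."
  let c := PySem.Str.find right_answer ","
  let p := PySem.Str.find right_answer "("
  let index : Int :=
    match [d, c, p].filter (fun x => x ≠ -1) with
    | [] => (PySem.Str.len right_answer : Int)
    | q :: qs =>
      let m := qs.foldl min q
      if m = d then m + 1 else if m = p then m - 1 else m
  let tail := PySem.Str.slice right_answer (some index) none
  if (PySem.Str.len (PySem.Str.strip tail) : Int) > 2 then tail else ""

-- ===== PRECONDITION & SPEC =====
def Spec_get_explanation (right_answer : String) (out : String) : Prop := out = get_explanation_alt right_answer
instance (right_answer : String) (out : String) : Decidable (Spec_get_explanation right_answer out) := by unfold Spec_get_explanation; infer_instance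

-- ===== CLAIM (what is proved, stated in full; the proofs are below) =====
def Claim_equal_get_explanation : Prop := ∀ (right_answer : String), Dom_get_explanation right_answer → Spec_get_explanation right_answer (get_explanation right_answer)

-- ===== LEMMAS AND PROOFS =====

-- find.go at offset k is find.go at offset 0 shifted by k (when found)
lemma find_go_shift (sub cs : List Char) (k : Nat) :
    PySem.Chars.find.go sub cs k =
      if PySem.Chars.find.go sub cs 0 = -1 then -1 else PySem.Chars.find.go sub cs 0 + k := by
  induction cs generalizing k with
  | nil =>
    by_cases h : sub.isEmpty
    · simp [PySem.Chars.find.go, h]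
    · simp [PySem.Chars.find.go, h]
  | cons x rest ih =>
    by_cases h : sub.isPrefixOf (x :: rest)
    · simp [PySem.Chars.find.go, h]
    · have e : ∀ j, PySem.Chars.find.go sub (x :: rest) j = PySem.Chars.find.go sub rest (j + 1) := by
        intro j; conv_lhs => rw [PySem.Chars.find.go]
        simp [h]
      have h0 : -1 ≤ PySem.Chars.find.go sub rest 0 := PySem.Chars.neg_one_le_find rest sub
      rw [e k, e 0, ih (k + 1), ih 1]
      split_ifs <;> push_cast <;> omega

-- one unfolding step of find for a single-character pattern
lemma find_cons (x ch : Char) (cs : List Char) :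
    PySem.Chars.find (x :: cs) [ch] =
      if x = ch then 0
      else if PySem.Chars.find cs [ch] = -1 then -1 else PySem.Chars.find cs [ch] + 1 := by
  by_cases h : x = ch
  · simp [PySem.Chars.find, PySem.Chars.find.go, h, List.isPrefixOf]
  · have hpre : ([ch].isPrefixOf (x :: cs)) = false := by
      rw [Bool.eq_false_iff]
      simp only [ne_eq, List.isPrefixOf_iff_prefix, List.cons_prefix_cons, List.nil_prefix, and_true]
      exact fun hc => h hc.symm
    rw [if_neg h]
    show PySem.Chars.find.go [ch] (x :: cs) 0 = _
    conv_lhs => rw [PySem.Chars.find.go]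
    simp only [hpre, Bool.false_eq_true, if_false]
    rw [find_go_shift [ch] cs 1]
    rfl

-- B's index selection, abstracted over the three find results and the length
def bSel (d c p n : Int) : Int :=
  match [d, c, p].filter (fun x => x ≠ -1) with
  | [] => n
  | q :: qs =>
    let m := qs.foldl min q
    if m = d then m + 1 else if m = p then m - 1 else m

-- a non-delimiter first char shifts every found position (and the length) by one
lemma bSel_shift (d c p n : Int) (hd : -1 ≤ d) (hc : -1 ≤ c) (hp : -1 ≤ p) :
    bSel (if d = -1 then -1 else d + 1) (if c = -1 then -1 else c + 1)
         (if p = -1 then -1 else p + 1) (n + 1) = 1 + bSel d c p n := by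
  have e1 : ¬ (d + 1 = -1) := by omega
  have e2 : ¬ (c + 1 = -1) := by omega
  have e3 : ¬ (p + 1 = -1) := by omega
  by_cases h1 : d = -1 <;> by_cases h2 : c = -1 <;> by_cases h3 : p = -1 <;>
    simp [bSel, h1, h2, h3, e1, e2, e3] <;> (try split_ifs) <;> omega

lemma bSel_dot (c p n : Int) (hc : -1 ≤ c) (hp : -1 ≤ p) :
    bSel 0 (if c = -1 then -1 else c + 1) (if p = -1 then -1 else p + 1) n = 1 := by
  have e2 : ¬ (c + 1 = -1) := by omega
  have e3 : ¬ (p + 1 = -1) := by omega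
  by_cases h2 : c = -1 <;> by_cases h3 : p = -1 <;>
    simp [bSel, h2, h3, e2, e3] <;> (try split_ifs) <;> omega

lemma bSel_comma (d p n : Int) (hd : -1 ≤ d) (hp : -1 ≤ p) :
    bSel (if d = -1 then -1 else d + 1) 0 (if p = -1 then -1 else p + 1) n = 0 := by
  have e1 : ¬ (d + 1 = -1) := by omega
  have e3 : ¬ (p + 1 = -1) := by omega
  by_cases h1 : d = -1 <;> by_cases h3 : p = -1 <;>
    simp [bSel, h1, h3, e1, e3] <;> (try split_ifs) <;> omega

lemma bSel_paren (d c n : Int) (hd : -1 ≤ d) (hc : -1 ≤ c) :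
    bSel (if d = -1 then -1 else d + 1) (if c = -1 then -1 else c + 1) 0 n = -1 := by
  have e1 : ¬ (d + 1 = -1) := by omega
  have e2 : ¬ (c + 1 = -1) := by omega
  by_cases h1 : d = -1 <;> by_cases h2 : c = -1 <;>
    simp [bSel, h1, h2, e1, e2] <;> (try split_ifs) <;> omega

-- the two index computations agree on every char list
lemma index_eq (cs : List Char) :
    bSel (PySem.Chars.find cs ['.']) (PySem.Chars.find cs [','])
         (PySem.Chars.find cs ['(']) (cs.length : Int) = getExpIndexA cs := by
  induction cs with
  | nil => decide
  | cons x rest ih =>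
    have hd := PySem.Chars.neg_one_le_find rest ['.']
    have hc := PySem.Chars.neg_one_le_find rest [',']
    have hp := PySem.Chars.neg_one_le_find rest ['(']
    rw [find_cons, find_cons, find_cons, getExpIndexA]
    by_cases h1 : x = '.'
    · simp only [h1, if_neg (by decide : ¬('.' : Char) = ','),
        if_neg (by decide : ¬('.' : Char) = '(')]
      rw [show ((('.' :: rest : List Char).length : Int)) = (rest.length : Int) + 1 by simp]
      exact bSel_dot _ _ _ hc hp
    · by_cases h2 : x = ','
      · simp only [h2, if_neg (by decide : ¬(',' : Char) = '.'),
          if_neg (by decide : ¬(',' : Char) = '(')]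
        rw [show (((',' :: rest : List Char).length : Int)) = (rest.length : Int) + 1 by simp]
        exact bSel_comma _ _ _ hd hp
      · by_cases h3 : x = '('
        · simp only [h3, if_neg (by decide : ¬('(' : Char) = '.'),
            if_neg (by decide : ¬('(' : Char) = ',')]
          rw [show ((('(' :: rest : List Char).length : Int)) = (rest.length : Int) + 1 by simp]
          exact bSel_paren _ _ _ hd hc
        · simp only [if_neg h1, if_neg h2, if_neg h3]
          rw [show (((x :: rest : List Char).length : Int)) = (rest.length : Int) + 1 by simp]
          rw [bSel_shift _ _ _ _ hd hc hp, ih]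

-- ===== VERDICT (by name: the statement is the Claim_ definition above) =====
theorem get_explanation_spec : Claim_equal_get_explanation := by
  intro s _
  show get_explanation s = get_explanation_alt s
  unfold get_explanation get_explanation_alt
  rw [show getExpIndexA s.toList
        = bSel (PySem.Chars.find s.toList ['.']) (PySem.Chars.find s.toList [','])
            (PySem.Chars.find s.toList ['(']) (s.toList.length : Int) from (index_eq s.toList).symm]
  rfl
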